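-- pv_equiv track=rewrite | github.com/newuni/memorizer | app/services/memory_service.py | _redact_pii
-- ===== SOURCE A (Python) =====
-- def _redact_pii(text: str) -> tuple[str, bool]:
--     out = text
--     changed = False
--     for token in ["@", "+34", "+1"]:
--         if token in out:
--             changed = True
--             out = out.replace(token, "[redacted]")
--     return out, changed
-- ===== SOURCE B (Python) =====
-- def _redact_pii(text: str) -> tuple[str, bool]:
--     # Single left-to-right scan: at each position try the tokens "@", "+34", "+1"
--     # (in that priority order), emit the replacement and skip the token, else copy
--     # the character.  One pass instead of three whole-string replace passes.
--     parts = []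
--     n = 0
--     i = 0
--     L = len(text)
--     while i < L:
--         ch = text[i]
--         if ch == '@':
--             parts.append("[redacted]")
--             n += 1
--             i += 1
--         elif ch == '+' and text[i + 1:i + 3] == "34":
--             parts.append("[redacted]")
--             n += 1
--             i += 3
--         elif ch == '+' and text[i + 1:i + 2] == "1":
--             parts.append("[redacted]")
--             n += 1
--             i += 2
--         else:
--             parts.append(ch)
--             i += 1
--     return "".join(parts), n > 0
-- ===== Notes on version B (the rewrite author's own statement) =====
-- stated objective: alternative
-- what changed: Replaces the three sequential whole-string replace passes with one left-to-right scan that matches the tokens @/+34/+1 at each position and builds the output once; equivalence holds because tokens cannot overlap and the replacement contains no token.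
import Mathlib
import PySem

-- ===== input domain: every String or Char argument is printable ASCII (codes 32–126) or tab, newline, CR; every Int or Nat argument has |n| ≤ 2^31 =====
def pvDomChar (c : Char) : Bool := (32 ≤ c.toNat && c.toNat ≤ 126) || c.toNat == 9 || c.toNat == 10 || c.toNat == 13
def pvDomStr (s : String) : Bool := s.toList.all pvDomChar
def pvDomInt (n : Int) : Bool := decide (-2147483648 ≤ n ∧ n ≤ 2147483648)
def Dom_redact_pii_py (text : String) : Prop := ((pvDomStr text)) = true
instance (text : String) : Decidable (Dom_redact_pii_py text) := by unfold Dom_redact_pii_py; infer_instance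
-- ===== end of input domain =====

-- B replaces A's three sequential whole-string replace passes by ONE left-to-right scan
-- that tries the tokens "@", "+34", "+1" at each position (alternative decomposition).

-- ===== PORT A =====
-- literal transliteration of A: for token in ["@","+34","+1"]: if token in out: changed=True; out=out.replace(token,"[redacted]")
def redact_pii_py (text : String) : String × Bool :=
  ["@", "+34", "+1"].foldl
    (fun (st : String × Bool) (token : String) =>
      if PySem.Str.isIn token st.1
      then (PySem.Str.replace st.1 token "[redacted]", true)
      else st)
    (text, false)

-- ===== PORT B =====
-- transliteration of Source B's single while-loop scan over the characters (ported by hand,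
-- exact: at each index try '@', then '+' followed by "34", then '+' followed by "1").
def pvScanB : List Char → List Char × Nat
  | [] => ([], 0)
  | c :: t =>
    if c = '@' then
      ("[redacted]".toList ++ (pvScanB t).1, (pvScanB t).2 + 1)
    else if c = '+' ∧ ['3', '4'] <+: t then
      ("[redacted]".toList ++ (pvScanB (t.drop 2)).1, (pvScanB (t.drop 2)).2 + 1)
    else if c = '+' ∧ ['1'] <+: t then
      ("[redacted]".toList ++ (pvScanB (t.drop 1)).1, (pvScanB (t.drop 1)).2 + 1)
    else
      (c :: (pvScanB t).1, (pvScanB t).2)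
termination_by l => l.length
decreasing_by
  all_goals simp <;> omega

def redact_pii_py_alt (text : String) : String × Bool :=
  (String.ofList (pvScanB text.toList).1, decide (0 < (pvScanB text.toList).2))

-- ===== PRECONDITION & SPEC =====
def Spec_redact_pii_py (text : String) (out : String × Bool) : Prop := out = redact_pii_py_alt text
instance (text : String) (out : String × Bool) : Decidable (Spec_redact_pii_py text out) := by unfold Spec_redact_pii_py; infer_instance

-- ===== CLAIM (what is proved, stated in full; the proofs are below) =====
def Claim_equal_redact_pii_py : Prop := ∀ (text : String), Dom_redact_pii_py text → Spec_redact_pii_py text (redact_pii_py text)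

-- ===== LEMMAS AND PROOFS =====

-- proof-side model of CPython str.replace for a nonempty needle
def pvRep (old new : List Char) : List Char → List Char
  | [] => []
  | c :: t =>
    if old.isPrefixOf (c :: t) then new ++ pvRep old new (t.drop (old.length - 1))
    else c :: pvRep old new t
termination_by l => l.length
decreasing_by
  all_goals simp <;> omega

def pvRedL : List Char := "[redacted]".toList
def pvTA : List Char := ['@']
def pvTB : List Char := ['+', '3', '4']
def pvTC : List Char := ['+', '1']

lemma pvGo_eq (old new : List Char) (h : old ≠ []) :
    ∀ (fuel : Nat) (l acc : List Char), l.length ≤ fuel →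
      PySem.Chars.replace.go old new fuel l acc = acc.reverse ++ pvRep old new l := by
  intro fuel
  induction fuel with
  | zero =>
    intro l acc hl
    have : l = [] := List.length_eq_zero_iff.mp (Nat.le_zero.mp hl)
    subst this
    simp [PySem.Chars.replace.go, pvRep]
  | succ n ih =>
    intro l acc hl
    cases l with
    | nil => simp [PySem.Chars.replace.go, pvRep]
    | cons c t =>
      rw [PySem.Chars.replace.go]
      by_cases hp : old.isPrefixOf (c :: t)
      · rw [if_pos hp]
        obtain ⟨c0, old', rfl⟩ : ∃ c0 old', old = c0 :: old' := by
          cases old with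
          | nil => exact absurd rfl h
          | cons a b => exact ⟨a, b, rfl⟩
        have hdrop : List.drop (c0 :: old').length (c :: t) = t.drop ((c0 :: old').length - 1) := by
          simp
        rw [hdrop, ih _ _ (by simp at hl ⊢; omega)]
        rw [pvRep, if_pos hp]
        simp [hdrop]
      · rw [if_neg hp, ih _ _ (by simp at hl ⊢; omega)]
        rw [pvRep, if_neg hp]
        simp
lemma pvReplace_eq (old new : List Char) (h : old ≠ []) (l : List Char) :
    PySem.Chars.replace l old new = pvRep old new l := by
  unfold PySem.Chars.replace
  rw [if_neg (by simp [h])]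
  simpa using pvGo_eq old new h l.length l [] le_rfl

-- skipping a copied block that does not contain the needle's first character
lemma pvRep_append (old new : List Char) (c0 : Char) (hold : old.head? = some c0) :
    ∀ (p x : List Char), c0 ∉ p → pvRep old new (p ++ x) = p ++ pvRep old new x := by
  intro p
  induction p with
  | nil => intro x _; simp
  | cons c p' ih =>
    intro x hp
    obtain ⟨old', rfl⟩ : ∃ old', old = c0 :: old' := by
      cases old with
      | nil => simp at hold
      | cons a b => simp at hold; subst hold; exact ⟨b, rfl⟩
    have hne : ¬ (c0 :: old').isPrefixOf (c :: (p' ++ x)) := by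
      simp [List.isPrefixOf_iff_prefix, List.cons_prefix_cons]
      intro hc
      exact absurd hc.symm (fun h => hp (by simp [h]))
    rw [List.cons_append, pvRep, if_neg hne]
    rw [ih x (fun hm => hp (by simp [hm]))]
    simp

lemma pvIsIn_cons (tok : List Char) (c : Char) (x : List Char) :
    PySem.Chars.isIn tok (c :: x) = true ↔ tok <+: (c :: x) ∨ PySem.Chars.isIn tok x = true := by
  simp [PySem.Chars.isIn_iff_infix, List.infix_cons_iff]

lemma pvRep_not_in (old new : List Char) (l : List Char)
    (h : PySem.Chars.isIn old l = false) : pvRep old new l = l := by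
  induction l with
  | nil => simp [pvRep]
  | cons c t ih =>
    have hn : ¬ PySem.Chars.isIn old (c :: t) = true := by simp [h]
    rw [pvIsIn_cons] at hn
    rw [not_or] at hn
    have hpre : ¬ old.isPrefixOf (c :: t) := by
      simp [List.isPrefixOf_iff_prefix]; exact hn.1
    rw [pvRep, if_neg hpre, ih (by simpa using hn.2)]

-- head of a replaced string: either the replacement's '[' or the original head
lemma pvRep_head (old : List Char) (l : List Char) :
    (pvRep old pvRedL l).head? = some '[' ∨ (pvRep old pvRedL l).head? = l.head? := by
  cases l with
  | nil => right; simp [pvRep]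
  | cons c t =>
    rw [pvRep]
    by_cases hp : old.isPrefixOf (c :: t)
    · rw [if_pos hp]; left; rfl
    · rw [if_neg hp]; right; rfl

lemma pvNotPrefixTB (t : List Char) (h : ¬ ['3', '4'] <+: t) :
    ¬ ['3', '4'] <+: pvRep pvTA pvRedL t := by
  intro hc
  cases t with
  | nil => simp [pvRep, pvTA] at hc
  | cons d t' =>
    rw [pvRep] at hc
    by_cases hp : pvTA.isPrefixOf (d :: t')
    · rw [if_pos hp] at hc
      have h3 : (pvRedL ++ pvRep pvTA pvRedL (List.drop (pvTA.length - 1) t')).head? = some '3' := by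
        obtain ⟨u, hu⟩ := hc
        rw [← hu]; rfl
      have h4 : (pvRedL ++ pvRep pvTA pvRedL (List.drop (pvTA.length - 1) t')).head? = some '[' := by
        rfl
      rw [h4] at h3
      exact absurd h3 (by decide)
    · rw [if_neg hp] at hc
      rw [List.cons_prefix_cons] at hc
      obtain ⟨hd, hc4⟩ := hc
      subst hd
      have ht' : ¬ ['4'] <+: t' := by
        intro h4; exact h (by rw [List.cons_prefix_cons]; exact ⟨rfl, h4⟩)
      rcases pvRep_head pvTA t' with hh | hh
      · cases t'' : pvRep pvTA pvRedL t' with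
        | nil => rw [t''] at hc4; simp at hc4
        | cons e r =>
          rw [t''] at hh hc4
          simp at hh
          rw [List.cons_prefix_cons] at hc4
          rw [hh] at hc4
          exact absurd hc4.1 (by decide)
      · cases t'' : pvRep pvTA pvRedL t' with
        | nil => rw [t''] at hc4; simp at hc4
        | cons e r =>
          rw [t''] at hh hc4
          rw [List.cons_prefix_cons] at hc4
          apply ht'
          cases t' with
          | nil => simp at hh
          | cons f t₂ =>
            simp at hh
            rw [List.cons_prefix_cons]
            exact ⟨by rw [← hh, hc4.1], List.nil_prefix⟩

lemma pvHeadNotOne (t : List Char) (h : t.head? ≠ some '1') :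
    (pvRep pvTB pvRedL (pvRep pvTA pvRedL t)).head? ≠ some '1' := by
  rcases pvRep_head pvTB (pvRep pvTA pvRedL t) with hh | hh
  · rw [hh]; decide
  · rw [hh]
    rcases pvRep_head pvTA t with hh2 | hh2
    · rw [hh2]; decide
    · rw [hh2]; exact h


lemma pvRedL_def : pvRedL = "[redacted]".toList := rfl

lemma pvPrefixOne (a : Char) (t : List Char) : (([a] : List Char) <+: t) ↔ t.head? = some a := by
  cases t with
  | nil => simp
  | cons b r => simp [List.cons_prefix_cons, eq_comm]

-- the main invariant: one scan equals the three sequential replaces, and the scan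
-- counter is positive exactly when one of A's three membership tests fires
lemma pvMain : ∀ (n : Nat) (l : List Char), l.length ≤ n →
    (pvRep pvTC pvRedL (pvRep pvTB pvRedL (pvRep pvTA pvRedL l)) = (pvScanB l).1 ∧
     ((PySem.Chars.isIn pvTA l = true ∨
       PySem.Chars.isIn pvTB (pvRep pvTA pvRedL l) = true ∨
       PySem.Chars.isIn pvTC (pvRep pvTB pvRedL (pvRep pvTA pvRedL l)) = true)
      ↔ 0 < (pvScanB l).2)) := by
  intro n
  induction n with
  | zero =>
    intro l hl
    have hnil : l = [] := List.length_eq_zero_iff.mp (Nat.le_zero.mp hl)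
    subst hnil
    exact ⟨by simp [pvRep, pvScanB],
      by simp [pvRep, pvScanB, PySem.Chars.isIn_iff_infix, pvTA, pvTB, pvTC]⟩
  | succ n ih =>
    intro l hl
    cases l with
    | nil =>
      exact ⟨by simp [pvRep, pvScanB],
        by simp [pvRep, pvScanB, PySem.Chars.isIn_iff_infix, pvTA, pvTB, pvTC]⟩
    | cons c t =>
      by_cases hA : c = '@'
      · -- token "@" matches at the front
        subst hA
        have hR1 : pvRep pvTA pvRedL ('@' :: t) = pvRedL ++ pvRep pvTA pvRedL t := by
          rw [pvRep, if_pos (by simp [pvTA, List.isPrefixOf_iff_prefix, List.cons_prefix_cons])]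
          simp [pvTA]
        have hR2 : pvRep pvTB pvRedL (pvRedL ++ pvRep pvTA pvRedL t)
            = pvRedL ++ pvRep pvTB pvRedL (pvRep pvTA pvRedL t) :=
          pvRep_append pvTB pvRedL '+' rfl pvRedL _ (by decide)
        have hR3 : pvRep pvTC pvRedL (pvRedL ++ pvRep pvTB pvRedL (pvRep pvTA pvRedL t))
            = pvRedL ++ pvRep pvTC pvRedL (pvRep pvTB pvRedL (pvRep pvTA pvRedL t)) :=
          pvRep_append pvTC pvRedL '+' rfl pvRedL _ (by decide)
        have hscan : pvScanB ('@' :: t)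
            = ("[redacted]".toList ++ (pvScanB t).1, (pvScanB t).2 + 1) := by
          rw [pvScanB, if_pos rfl]
        obtain ⟨ihs, _⟩ := ih t (by simp at hl; omega)
        constructor
        · rw [hR1, hR2, hR3, hscan, ihs, pvRedL_def]
        · rw [hscan]
          constructor
          · intro _; omega
          · intro _
            left
            rw [pvIsIn_cons]
            left
            simp [pvTA, List.cons_prefix_cons]
      · by_cases hB : c = '+' ∧ ['3', '4'] <+: t
        · -- token "+34" matches at the front
          obtain ⟨hc, ⟨u, hu⟩⟩ := hB
          subst hc
          subst hu
          have hR1 : pvRep pvTA pvRedL ('+' :: (['3', '4'] ++ u))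
              = '+' :: '3' :: '4' :: pvRep pvTA pvRedL u := by
            rw [pvRep, if_neg (by simp [pvTA, List.isPrefixOf_iff_prefix, List.cons_prefix_cons])]
            rw [List.cons_append, List.singleton_append]
            rw [pvRep, if_neg (by simp [pvTA, List.isPrefixOf_iff_prefix, List.cons_prefix_cons])]
            rw [pvRep, if_neg (by simp [pvTA, List.isPrefixOf_iff_prefix, List.cons_prefix_cons])]
          have hR2 : pvRep pvTB pvRedL ('+' :: '3' :: '4' :: pvRep pvTA pvRedL u)
              = pvRedL ++ pvRep pvTB pvRedL (pvRep pvTA pvRedL u) := by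
            rw [pvRep, if_pos (by
              simp [pvTB, List.isPrefixOf_iff_prefix, List.cons_prefix_cons])]
            simp [pvTB]
          have hR3 : pvRep pvTC pvRedL (pvRedL ++ pvRep pvTB pvRedL (pvRep pvTA pvRedL u))
              = pvRedL ++ pvRep pvTC pvRedL (pvRep pvTB pvRedL (pvRep pvTA pvRedL u)) :=
            pvRep_append pvTC pvRedL '+' rfl pvRedL _ (by decide)
          have hscan : pvScanB ('+' :: (['3', '4'] ++ u))
              = ("[redacted]".toList ++ (pvScanB u).1, (pvScanB u).2 + 1) := by
            rw [pvScanB, if_neg (by decide), if_pos ⟨rfl, ⟨u, rfl⟩⟩]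
            simp
          obtain ⟨ihs, _⟩ := ih u (by simp at hl; omega)
          constructor
          · rw [hR1, hR2, hR3, hscan, ihs, pvRedL_def]
          · rw [hscan]
            constructor
            · intro _; omega
            · intro _
              right; left
              rw [hR1, pvIsIn_cons]
              left
              simp [pvTB, List.cons_prefix_cons]
        · by_cases hC : c = '+' ∧ ['1'] <+: t
          · -- token "+1" matches at the front
            obtain ⟨hc, ⟨u, hu⟩⟩ := hC
            subst hc
            subst hu
            have hR1 : pvRep pvTA pvRedL ('+' :: (['1'] ++ u))
                = '+' :: '1' :: pvRep pvTA pvRedL u := by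
              rw [pvRep, if_neg (by simp [pvTA, List.isPrefixOf_iff_prefix, List.cons_prefix_cons])]
              rw [List.singleton_append]
              rw [pvRep, if_neg (by simp [pvTA, List.isPrefixOf_iff_prefix, List.cons_prefix_cons])]
            have hR2 : pvRep pvTB pvRedL ('+' :: '1' :: pvRep pvTA pvRedL u)
                = '+' :: '1' :: pvRep pvTB pvRedL (pvRep pvTA pvRedL u) := by
              rw [pvRep, if_neg (by
                simp [pvTB, List.isPrefixOf_iff_prefix, List.cons_prefix_cons])]
              rw [pvRep, if_neg (by
                simp [pvTB, List.isPrefixOf_iff_prefix, List.cons_prefix_cons])]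
            have hR3 : pvRep pvTC pvRedL ('+' :: '1' :: pvRep pvTB pvRedL (pvRep pvTA pvRedL u))
                = pvRedL ++ pvRep pvTC pvRedL (pvRep pvTB pvRedL (pvRep pvTA pvRedL u)) := by
              rw [pvRep, if_pos (by
                simp [pvTC, List.isPrefixOf_iff_prefix, List.cons_prefix_cons])]
              simp [pvTC]
            have hscan : pvScanB ('+' :: (['1'] ++ u))
                = ("[redacted]".toList ++ (pvScanB u).1, (pvScanB u).2 + 1) := by
              rw [pvScanB, if_neg (by decide),
                if_neg (by
                  rintro ⟨-, ⟨v, hv⟩⟩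
                  rw [List.singleton_append] at hv
                  simp [List.cons.injEq] at hv),
                if_pos ⟨rfl, ⟨u, rfl⟩⟩]
              simp
            obtain ⟨ihs, _⟩ := ih u (by simp at hl; omega)
            constructor
            · rw [hR1, hR2, hR3, hscan, ihs, pvRedL_def]
            · rw [hscan]
              constructor
              · intro _; omega
              · intro _
                right; right
                rw [hR1, hR2, pvIsIn_cons]
                left
                simp [pvTC, List.cons_prefix_cons]
          · -- no token matches at the front: copy one character on both sides
            have hR1 : pvRep pvTA pvRedL (c :: t) = c :: pvRep pvTA pvRedL t := by
              rw [pvRep, if_neg (by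
                simp [pvTA, List.isPrefixOf_iff_prefix, List.cons_prefix_cons]
                exact fun hc => hA hc.symm)]
            have hnB : ¬ pvTB <+: c :: pvRep pvTA pvRedL t := by
              intro hpre
              rw [show pvTB = '+' :: ['3', '4'] from rfl, List.cons_prefix_cons] at hpre
              obtain ⟨hc, h34⟩ := hpre
              have ht34 : ¬ ['3', '4'] <+: t := fun h34t => hB ⟨hc.symm, h34t⟩
              exact pvNotPrefixTB t ht34 h34
            have hR2 : pvRep pvTB pvRedL (c :: pvRep pvTA pvRedL t)
                = c :: pvRep pvTB pvRedL (pvRep pvTA pvRedL t) := by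
              rw [pvRep, if_neg (by simpa [List.isPrefixOf_iff_prefix] using hnB)]
            have hnC : ¬ pvTC <+: c :: pvRep pvTB pvRedL (pvRep pvTA pvRedL t) := by
              intro hpre
              rw [show pvTC = '+' :: ['1'] from rfl, List.cons_prefix_cons] at hpre
              obtain ⟨hc, h1⟩ := hpre
              have ht1 : t.head? ≠ some '1' := by
                intro hh
                exact hC ⟨hc.symm, (pvPrefixOne '1' t).mpr hh⟩
              rw [pvPrefixOne] at h1
              exact pvHeadNotOne t ht1 h1
            have hR3 : pvRep pvTC pvRedL (c :: pvRep pvTB pvRedL (pvRep pvTA pvRedL t))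
                = c :: pvRep pvTC pvRedL (pvRep pvTB pvRedL (pvRep pvTA pvRedL t)) := by
              rw [pvRep, if_neg (by simpa [List.isPrefixOf_iff_prefix] using hnC)]
            have hscan : pvScanB (c :: t) = (c :: (pvScanB t).1, (pvScanB t).2) := by
              rw [pvScanB, if_neg hA, if_neg hB, if_neg hC]
            obtain ⟨ihs, ihb⟩ := ih t (by simp at hl; omega)
            constructor
            · rw [hR1, hR2, hR3, hscan, ihs]
            · rw [hR1, hR2, hscan]
              have e1 : PySem.Chars.isIn pvTA (c :: t) = true ↔ PySem.Chars.isIn pvTA t = true := by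
                rw [pvIsIn_cons]
                constructor
                · rintro (hpre | h)
                  · exact absurd ((pvPrefixOne '@' (c :: t)).mp hpre) (by simp [hA])
                  · exact h
                · exact Or.inr
              have e2 : PySem.Chars.isIn pvTB (c :: pvRep pvTA pvRedL t) = true
                  ↔ PySem.Chars.isIn pvTB (pvRep pvTA pvRedL t) = true := by
                rw [pvIsIn_cons]
                constructor
                · rintro (hpre | h)
                  · exact absurd hpre hnB
                  · exact h
                · exact Or.inr
              have e3 : PySem.Chars.isIn pvTC (c :: pvRep pvTB pvRedL (pvRep pvTA pvRedL t)) = true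
                  ↔ PySem.Chars.isIn pvTC (pvRep pvTB pvRedL (pvRep pvTA pvRedL t)) = true := by
                rw [pvIsIn_cons]
                constructor
                · rintro (hpre | h)
                  · exact absurd hpre hnC
                  · exact h
                · exact Or.inr
              rw [e1, e2, e3]
              exact ihb

lemma pvTA_def : "@".toList = pvTA := by decide
lemma pvTB_def : "+34".toList = pvTB := by decide
lemma pvTC_def : "+1".toList = pvTC := by decide

-- one fold step of A collapses: the guarded replace equals an unconditional replace
lemma pvStep (s : String) (b : Bool) (tok : String) (htok : tok.toList ≠ []) :
    (if PySem.Str.isIn tok s then (PySem.Str.replace s tok "[redacted]", true) else (s, b))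
    = (PySem.Str.replace s tok "[redacted]", b || PySem.Str.isIn tok s) := by
  by_cases h : PySem.Chars.isIn tok.toList s.toList = true
  · simp [h]
  · have h' : PySem.Chars.isIn tok.toList s.toList = false := by simpa using h
    have hrep : PySem.Str.replace s tok "[redacted]" = s := by
      unfold PySem.Str.replace
      rw [pvReplace_eq _ _ htok, pvRep_not_in _ _ _ h']
      simp
    simp [h', hrep]

theorem redact_pii_py_spec : Claim_equal_redact_pii_py := by
  intro text _
  unfold Spec_redact_pii_py redact_pii_py redact_pii_py_alt
  rw [List.foldl_cons, List.foldl_cons, List.foldl_cons, List.foldl_nil]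
  rw [pvStep _ _ _ (by decide), pvStep _ _ _ (by decide), pvStep _ _ _ (by decide)]
  dsimp only
  obtain ⟨hs, hb⟩ := pvMain text.toList.length text.toList le_rfl
  have e1 : PySem.Str.replace text "@" "[redacted]"
      = String.ofList (pvRep pvTA pvRedL text.toList) := by
    unfold PySem.Str.replace
    rw [pvReplace_eq _ _ (by decide), pvTA_def, ← pvRedL_def]
  have e2 : PySem.Str.replace (PySem.Str.replace text "@" "[redacted]") "+34" "[redacted]"
      = String.ofList (pvRep pvTB pvRedL (pvRep pvTA pvRedL text.toList)) := by
    conv_lhs => rw [e1]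
    unfold PySem.Str.replace
    rw [String.toList_ofList, pvReplace_eq _ _ (by decide), pvTB_def, ← pvRedL_def]
  have e3 : PySem.Str.replace (PySem.Str.replace (PySem.Str.replace text "@" "[redacted]")
        "+34" "[redacted]") "+1" "[redacted]"
      = String.ofList (pvRep pvTC pvRedL (pvRep pvTB pvRedL (pvRep pvTA pvRedL text.toList))) := by
    conv_lhs => rw [e2]
    unfold PySem.Str.replace
    rw [String.toList_ofList, pvReplace_eq _ _ (by decide), pvTC_def, ← pvRedL_def]
  refine Prod.ext (e3.trans (congrArg String.ofList hs)) ?_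
  rw [e1] at e2
  rw [Bool.false_or, e1, e2, Bool.eq_iff_iff]
  simp only [Bool.or_eq_true, decide_eq_true_eq, PySem.Str.isIn_eq, String.toList_ofList,
    pvTA_def, pvTB_def, pvTC_def]
  rw [or_assoc]
  exact hb
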